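-- pv_equiv track=rewrite | github.com/nn44nniri/BeefGuide_Optimizer | BeefMPC_Guide/engine_adapter.py | _strip_json_comments
-- ===== SOURCE A (Python) =====
-- def _strip_json_comments(text: str) -> str:
--     out: list[str] = []
--     i = 0
--     in_string = False
--     escape = False
--     while i < len(text):
--         ch = text[i]
--         nxt = text[i + 1] if i + 1 < len(text) else ""
--         if in_string:
--             out.append(ch)
--             if escape:
--                 escape = False
--             elif ch == "\\":
--                 escape = True
--             elif ch == '"':
--                 in_string = False
--             i += 1
--             continue
--         if ch == '"':
--             in_string = True
--             out.append(ch)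
--             i += 1
--             continue
--         if ch == '/' and nxt == '/':
--             i += 2
--             while i < len(text) and text[i] not in '\r\n':
--                 i += 1
--             continue
--         if ch == '/' and nxt == '*':
--             i += 2
--             while i + 1 < len(text) and not (text[i] == '*' and text[i + 1] == '/'):
--                 i += 1
--             i += 2
--             continue
--         out.append(ch)
--         i += 1
--     return ''.join(out)
-- ===== SOURCE B (Python) =====
-- def _strip_json_comments(text: str) -> str:
--     # One-pass 7-state DFA (no lookahead, no inner skip loops).
--     NORMAL, SLASH, LINE, BLOCK, STAR, STRING, ESC = range(7)
--     state = NORMAL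
--     out: list[str] = []
--     for ch in text:
--         if state == NORMAL:
--             if ch == '"':
--                 out.append(ch)
--                 state = STRING
--             elif ch == '/':
--                 state = SLASH
--             else:
--                 out.append(ch)
--         elif state == SLASH:
--             if ch == '/':
--                 state = LINE
--             elif ch == '*':
--                 state = BLOCK
--             else:
--                 out.append('/')
--                 out.append(ch)
--                 state = STRING if ch == '"' else NORMAL
--         elif state == LINE:
--             if ch in '\r\n':
--                 out.append(ch)
--                 state = NORMAL
--         elif state == BLOCK:
--             if ch == '*':
--                 state = STAR
--         elif state == STAR:
--             if ch == '/':
--                 state = NORMAL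
--             elif ch != '*':
--                 state = BLOCK
--         elif state == STRING:
--             out.append(ch)
--             if ch == '\\':
--                 state = ESC
--             elif ch == '"':
--                 state = NORMAL
--         else:  # ESC
--             out.append(ch)
--             state = STRING
--     if state == SLASH:
--         out.append('/')
--     return ''.join(out)
-- ===== Notes on version B (the rewrite author's own statement) =====
-- stated objective: alternative
-- what changed: Replaces A's index loop with one-character lookahead and two inner skip-loops plus in_string/escape flags by a single one-pass 7-state DFA (NORMAL/SLASH/LINE/BLOCK/STAR/STRING/ESC) over the characters, flushing a pending slash at end of input.
import Mathlib
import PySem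

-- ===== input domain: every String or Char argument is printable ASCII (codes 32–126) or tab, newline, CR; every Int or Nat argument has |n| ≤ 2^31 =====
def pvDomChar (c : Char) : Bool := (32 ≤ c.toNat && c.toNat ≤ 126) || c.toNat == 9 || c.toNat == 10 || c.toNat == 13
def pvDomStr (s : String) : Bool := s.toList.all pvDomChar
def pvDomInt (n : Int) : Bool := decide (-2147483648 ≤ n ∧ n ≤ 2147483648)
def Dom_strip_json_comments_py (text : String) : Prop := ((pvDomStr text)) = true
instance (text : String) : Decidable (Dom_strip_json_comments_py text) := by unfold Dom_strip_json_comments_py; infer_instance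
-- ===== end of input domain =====

-- B replaces A's index loop with lookahead and inner skip-loops by a one-pass 7-state DFA; same result.

-- ===== PORT A =====
-- inner loop `while i < len(text) and text[i] not in '\r\n': i += 1` on the remaining characters
def lineSkipA : List Char → List Char
  | [] => []
  | c :: rest => if c = '\r' ∨ c = '\n' then c :: rest else lineSkipA rest

-- inner loop `while i + 1 < len(text) and not (text[i] == '*' and text[i+1] == '/'): i += 1; i += 2`
def blockSkipA : List Char → List Char
  | a :: b :: rest => if a = '*' ∧ b = '/' then rest else blockSkipA (b :: rest)
  | _ => []

theorem lineSkipA_length (l : List Char) : (lineSkipA l).length ≤ l.length := by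
  induction l with
  | nil => simp [lineSkipA]
  | cons c rest ih => simp only [lineSkipA]; split <;> simp <;> omega

theorem blockSkipA_length (l : List Char) : (blockSkipA l).length ≤ l.length := by
  induction hn : l.length generalizing l with
  | zero => match l with | [] => simp [blockSkipA]
  | succ n ih =>
    match l with
    | [a] => simp [blockSkipA]
    | a :: b :: rest =>
      simp only [blockSkipA]; split
      · simp at hn ⊢; omega
      · have := ih (b :: rest) (by simpa using hn)
        simp at hn ⊢; omega

-- main `while i < len(text)` loop; state = (remaining chars, in_string, escape)
def mainA : List Char → Bool → Bool → List Char
  | [], _, _ => []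
  | c :: rest, inStr, esc =>
    if inStr then
      c :: (if esc then mainA rest true false
            else if c = '\\' then mainA rest true true
            else if c = '"' then mainA rest false false
            else mainA rest true false)
    else if c = '"' then c :: mainA rest true esc
    else if c = '/' ∧ rest.head? = some '/' then mainA (lineSkipA rest.tail) false esc
    else if c = '/' ∧ rest.head? = some '*' then mainA (blockSkipA rest.tail) false esc
    else c :: mainA rest false esc
termination_by l _ _ => l.length
decreasing_by
  all_goals simp
  · have h1 := lineSkipA_length (rest.tail)
    have h2 : rest.tail.length ≤ rest.length := by cases rest <;> simp
    omega
  · have h1 := blockSkipA_length (rest.tail)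
    have h2 : rest.tail.length ≤ rest.length := by cases rest <;> simp
    omega

def strip_json_comments_py (text : String) : String :=
  String.mk (mainA text.toList false false)

-- ===== PORT B =====
inductive BState | normal | slash | line | block | star | strng | esc
  deriving DecidableEq, Repr

-- one DFA transition: (state, out) × char → (state, out)
def stepB : BState × List Char → Char → BState × List Char
  | (.normal, out), ch =>
    if ch = '"' then (.strng, out ++ [ch])
    else if ch = '/' then (.slash, out)
    else (.normal, out ++ [ch])
  | (.slash, out), ch =>
    if ch = '/' then (.line, out)
    else if ch = '*' then (.block, out)
    else ((if ch = '"' then .strng else .normal), out ++ ['/', ch])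
  | (.line, out), ch => if ch = '\r' ∨ ch = '\n' then (.normal, out ++ [ch]) else (.line, out)
  | (.block, out), ch => if ch = '*' then (.star, out) else (.block, out)
  | (.star, out), ch =>
    if ch = '/' then (.normal, out)
    else if ch = '*' then (.star, out) else (.block, out)
  | (.strng, out), ch =>
    ((if ch = '\\' then .esc else if ch = '"' then .normal else .strng), out ++ [ch])
  | (.esc, out), ch => (.strng, out ++ [ch])

def strip_json_comments_py_alt (text : String) : String :=
  let r := text.toList.foldl stepB (.normal, [])
  String.mk (if r.1 = .slash then r.2 ++ ['/'] else r.2)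

-- ===== PRECONDITION & SPEC =====
def Spec_strip_json_comments_py (text : String) (out : String) : Prop := out = strip_json_comments_py_alt text
instance (text : String) (out : String) : Decidable (Spec_strip_json_comments_py text out) := by unfold Spec_strip_json_comments_py; infer_instance

-- ===== CLAIM (what is proved, stated in full; the proofs are below) =====
def Claim_equal_strip_json_comments_py : Prop := ∀ (text : String), Dom_strip_json_comments_py text → Spec_strip_json_comments_py text (strip_json_comments_py text)

-- ===== LEMMAS AND PROOFS =====

-- recursive reading of B's fold (including the final pending-'/' flush)
def runB : BState → List Char → List Char
  | s, [] => if s = .slash then ['/'] else []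
  | s, c :: l => (stepB (s, []) c).2 ++ runB (stepB (s, []) c).1 l

theorem stepB_out (s : BState) (out : List Char) (c : Char) :
    stepB (s, out) c = ((stepB (s, []) c).1, out ++ (stepB (s, []) c).2) := by
  cases s <;> simp only [stepB] <;> (try split_ifs) <;> simp

theorem foldB (l : List Char) (s : BState) (out : List Char) :
    (let r := l.foldl stepB (s, out)
     if r.1 = .slash then r.2 ++ ['/'] else r.2) = out ++ runB s l := by
  induction l generalizing s out with
  | nil => simp [runB]; split <;> simp
  | cons c l ih =>
    simp only [List.foldl_cons, runB, stepB_out s out c]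
    rw [ih]; simp

theorem runB_line (l : List Char) : runB .line l = runB .normal (lineSkipA l) := by
  induction l with
  | nil => simp [runB, lineSkipA]
  | cons c rest ih =>
    simp only [lineSkipA]
    by_cases h : c = '\r' ∨ c = '\n'
    · have hq : ¬ c = '"' := by rcases h with h | h <;> subst h <;> decide
      have hs : ¬ c = '/' := by rcases h with h | h <;> subst h <;> decide
      simp [runB, stepB, h, hq, hs]
    · simpa [runB, stepB, h] using ih

theorem runB_star (b : Char) (l : List Char) (hb : b ≠ '/') :
    runB .star (b :: l) = runB .block (b :: l) := by
  by_cases h : b = '*' <;> simp [runB, stepB, h, hb]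

theorem runB_block (l : List Char) : runB .block l = runB .normal (blockSkipA l) := by
  induction hn : l.length generalizing l with
  | zero => match l with | [] => simp [runB, blockSkipA]
  | succ n ih =>
    match l with
    | [a] => by_cases h : a = '*' <;> simp [runB, stepB, blockSkipA, h]
    | a :: b :: rest =>
      simp only [blockSkipA]
      by_cases h : a = '*' ∧ b = '/'
      · simp [runB, stepB, h.1, h.2]
      · rw [if_neg h]
        have key : runB .block (a :: b :: rest) = runB .block (b :: rest) := by
          by_cases ha : a = '*'
          · have hb : b ≠ '/' := fun hb => h ⟨ha, hb⟩
            calc runB .block (a :: b :: rest) = runB .star (b :: rest) := by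
                  simp [runB, stepB, ha]
              _ = runB .block (b :: rest) := runB_star b rest hb
          · simp [runB, stepB, ha]
        rw [key, ih (b :: rest) (by simpa using hn)]

theorem runB_slash (l : List Char) (h : l.head? ≠ some '/' ∧ l.head? ≠ some '*') :
    runB .slash l = '/' :: runB .normal l := by
  match l with
  | [] => simp [runB]
  | c :: rest =>
    obtain ⟨h1, h2⟩ := h
    simp only [List.head?] at h1 h2
    have hc1 : c ≠ '/' := by intro hc; exact h1 (by simp [hc])
    have hc2 : c ≠ '*' := by intro hc; exact h2 (by simp [hc])
    by_cases hq : c = '"' <;> simp [runB, stepB, hc1, hc2, hq]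

theorem mainA_runB (n : Nat) (l : List Char) (hl : l.length ≤ n) :
    mainA l false false = runB .normal l ∧
    mainA l true false = runB .strng l ∧
    mainA l true true = runB .esc l := by
  induction n generalizing l with
  | zero =>
    match l with
    | [] => simp [mainA, runB]
  | succ n ih =>
    match l with
    | [] => simp [mainA, runB]
    | c :: rest =>
      have hr : rest.length ≤ n := by simp at hl; omega
      have IH := ih rest hr
      refine ⟨?_, ?_, ?_⟩
      · -- normal state
        by_cases hq : c = '"'
        · simp [mainA, runB, stepB, hq, IH.2.1]
        · by_cases hline : c = '/' ∧ rest.head? = some '/'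
          · obtain ⟨hc, hh⟩ := hline
            subst hc
            cases rest with
            | nil => simp at hh
            | cons r0 rest2 =>
              simp only [List.head?, Option.some.injEq] at hh
              subst hh
              have hs : (lineSkipA rest2).length ≤ n := by
                have := lineSkipA_length rest2; simp at hl; omega
              have e1 : mainA ('/' :: '/' :: rest2) false false =
                  mainA (lineSkipA rest2) false false := by
                simp [mainA]
              have e2 : runB .normal ('/' :: '/' :: rest2) = runB .line rest2 := by
                simp [runB, stepB]
              rw [e1, e2, (ih _ hs).1, ← runB_line]
          · by_cases hblk : c = '/' ∧ rest.head? = some '*'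
            · obtain ⟨hc, hh⟩ := hblk
              subst hc
              cases rest with
              | nil => simp at hh
              | cons r0 rest2 =>
                simp only [List.head?, Option.some.injEq] at hh
                subst hh
                have hs : (blockSkipA rest2).length ≤ n := by
                  have := blockSkipA_length rest2; simp at hl; omega
                have e1 : mainA ('/' :: '*' :: rest2) false false =
                    mainA (blockSkipA rest2) false false := by
                  simp [mainA]
                have e2 : runB .normal ('/' :: '*' :: rest2) = runB .block rest2 := by
                  simp [runB, stepB]
                rw [e1, e2, (ih _ hs).1, ← runB_block]
            · by_cases hc : c = '/'
              · subst hc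
                have hh1 : rest.head? ≠ some '/' := fun h => hline ⟨rfl, h⟩
                have hh2 : rest.head? ≠ some '*' := fun h => hblk ⟨rfl, h⟩
                have e1 : mainA ('/' :: rest) false false =
                    '/' :: mainA rest false false := by
                  simp [mainA, hh1, hh2]
                have e2 : runB .normal ('/' :: rest) = runB .slash rest := by
                  simp [runB, stepB]
                rw [e1, e2, runB_slash rest ⟨hh1, hh2⟩, IH.1]
              · simp [mainA, runB, stepB, hq, hc, hline, hblk, IH.1]
        -- string state
      · by_cases hb : c = '\\'
        · simp [mainA, runB, stepB, hb, IH.2.2]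
        · by_cases hq : c = '"'
          · simp [mainA, runB, stepB, hb, hq, IH.1]
          · simp [mainA, runB, stepB, hb, hq, IH.2.1]
      · -- escape state
        simp [mainA, runB, stepB, IH.2.1]

-- ===== VERDICT (by name: the statement is the Claim_ definition above) =====
theorem strip_json_comments_py_spec : Claim_equal_strip_json_comments_py := by
  intro text _
  unfold Spec_strip_json_comments_py strip_json_comments_py strip_json_comments_py_alt
  rw [(mainA_runB text.toList.length text.toList le_rfl).1]
  have := foldB text.toList .normal []
  simp only [List.nil_append] at this
  rw [← this]
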